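-- pv_equiv track=rewrite | github.com/hkgkhanh/15-puzzle-solver | fringe_bfs.py | encode5913_board
-- ===== SOURCE A (Python) =====
-- def encode5913_board(board):
--     encode_list = ["x", "x", "x", "x"]
--     for i in range(len(board)):
--         for j in range(len(board[i])):
--             if board[i][j] == 5:
--                 encode_list[0] = "0123456789abcdef"[i * 4 + j]
--             elif board[i][j] == 9:
--                 encode_list[1] = "0123456789abcdef"[i * 4 + j]
--             elif board[i][j] == 13:
--                 encode_list[2] = "0123456789abcdef"[i * 4 + j]
--             elif board[i][j] == 0:
--                 encode_list[3] = "0123456789abcdef"[i * 4 + j]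
--
--     encode_str = "".join(encode_list)
--     return encode_str
-- ===== SOURCE B (Python) =====
-- def encode5913_board(board):
--     # flatten once to (value, flat-index) pairs, then one back-to-front search per target
--     cells = [(v, i * 4 + j)
--              for i, row in enumerate(board)
--              for j, v in enumerate(row)]
--     out = []
--     for t in (5, 9, 13, 0):
--         c = "x"
--         for v, f in reversed(cells):
--             if v == t:
--                 c = "0123456789abcdef"[f]
--                 break
--         out.append(c)
--     return "".join(out)
-- ===== Notes on version B (the rewrite author's own statement) =====
-- stated objective: alternative
-- what changed: Replaces the per-cell 4-way elif that mutates a 4-slot list with a single flattening pass to (value, flat-index) pairs followed by one reverse search per target (last occurrence wins, matching A's overwrites).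
import Mathlib
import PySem

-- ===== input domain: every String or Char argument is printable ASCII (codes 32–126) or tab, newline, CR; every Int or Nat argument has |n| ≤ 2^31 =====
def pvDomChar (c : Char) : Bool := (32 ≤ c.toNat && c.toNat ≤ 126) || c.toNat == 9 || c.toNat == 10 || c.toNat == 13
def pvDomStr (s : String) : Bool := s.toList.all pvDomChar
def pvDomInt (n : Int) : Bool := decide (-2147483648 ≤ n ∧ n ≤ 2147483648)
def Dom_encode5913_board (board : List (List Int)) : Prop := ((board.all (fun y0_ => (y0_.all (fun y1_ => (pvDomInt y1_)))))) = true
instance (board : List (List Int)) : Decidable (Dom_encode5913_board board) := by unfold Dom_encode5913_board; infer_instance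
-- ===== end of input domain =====

-- B replaces A's per-cell 4-way elif over a mutable 4-slot list by one flattening pass
-- to (value, flat-index) pairs plus one reverse search per target (alternative, same cost).

-- shared atom: the hex table and the 1-char string "0123456789abcdef"[f]
def pvHex : List Char :=
  ['0','1','2','3','4','5','6','7','8','9','a','b','c','d','e','f']

def pvHx (f : Int) : String := String.ofList [PySem.List.pyGetD pvHex f 'x']

-- ===== PORT A =====
def encode5913_board (board : List (List Int)) : String :=
  let encodeList : List String := ["x", "x", "x", "x"]
  let encodeList :=
    (PySem.List.pyRange 0 (PySem.List.len board) 1).foldl (fun el i =>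
      let row := PySem.List.pyGetD board i []
      (PySem.List.pyRange 0 (PySem.List.len row) 1).foldl (fun el j =>
        let v := PySem.List.pyGetD row j 0
        if v = 5 then PySem.List.pySetD el 0 (pvHx (i * 4 + j))
        else if v = 9 then PySem.List.pySetD el 1 (pvHx (i * 4 + j))
        else if v = 13 then PySem.List.pySetD el 2 (pvHx (i * 4 + j))
        else if v = 0 then PySem.List.pySetD el 3 (pvHx (i * 4 + j))
        else el) el) encodeList
  PySem.Str.join "" encodeList

-- ===== PORT B =====
def pvCells (board : List (List Int)) : List (Int × Int) :=
  (PySem.List.enumerate board).flatMap (fun p =>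
    (PySem.List.enumerate p.2).map (fun q => (q.2, p.1 * 4 + q.1)))

def pvFindBack (cells : List (Int × Int)) (t : Int) : String :=
  match cells.reverse.find? (fun c => c.1 == t) with
  | some c => pvHx c.2
  | none => "x"

def encode5913_board_alt (board : List (List Int)) : String :=
  PySem.Str.join "" (([5, 9, 13, 0] : List Int).map (pvFindBack (pvCells board)))

-- ===== PRECONDITION & SPEC =====
-- Pre_ excludes exactly the inputs where Python A raises IndexError: a cell holding
-- 5, 9, 13 or 0 whose flat index i*4+j is ≥ 16.
def Pre_encode5913_board (board : List (List Int)) : Prop :=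
  ∀ p ∈ PySem.List.enumerate board, ∀ q ∈ PySem.List.enumerate p.2,
    (q.2 = 5 ∨ q.2 = 9 ∨ q.2 = 13 ∨ q.2 = 0) → p.1 * 4 + q.1 < 16

instance (board : List (List Int)) : Decidable (Pre_encode5913_board board) := by
  unfold Pre_encode5913_board; infer_instance

def pvWitness_encode5913_board : List (List Int) :=
  [[1, 2, 3, 4], [5, 6, 7, 8], [9, 10, 11, 12], [13, 14, 15, 0]]

def Spec_encode5913_board (board : List (List Int)) (out : String) : Prop :=
  out = encode5913_board_alt board
instance (board : List (List Int)) (out : String) : Decidable (Spec_encode5913_board board out) := by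
  unfold Spec_encode5913_board; infer_instance

-- ===== CLAIM (what is proved, stated in full; the proofs are below) =====
def Claim_equal_encode5913_board : Prop := ∀ (board : List (List Int)), Dom_encode5913_board board → Pre_encode5913_board board → Spec_encode5913_board board (encode5913_board board)

-- ===== LEMMAS AND PROOFS =====

-- the per-cell update A performs, phrased on a (value, flat-index) pair
def pvStep (el : List String) (c : Int × Int) : List String :=
  if c.1 = 5 then PySem.List.pySetD el 0 (pvHx c.2)
  else if c.1 = 9 then PySem.List.pySetD el 1 (pvHx c.2)
  else if c.1 = 13 then PySem.List.pySetD el 2 (pvHx c.2)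
  else if c.1 = 0 then PySem.List.pySetD el 3 (pvHx c.2)
  else el

theorem foldl_flatMap' {α β σ : Type} (h : α → List β) (f : σ → β → σ)
    (l : List α) (init : σ) :
    (l.flatMap h).foldl f init = l.foldl (fun s x => (h x).foldl f s) init := by
  induction l generalizing init with
  | nil => rfl
  | cons a l ih => simp [List.flatMap_cons, List.foldl_append, ih]

-- generalized find-back with an accumulator default
def pvW (L : List (Int × Int)) (t : Int) (x : String) : String :=
  match L.reverse.find? (fun c => c.1 == t) with
  | some c => pvHx c.2
  | none => x

theorem pvW_cons (c : Int × Int) (L : List (Int × Int)) (t : Int) (x : String) :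
    pvW (c :: L) t x = pvW L t (if c.1 = t then pvHx c.2 else x) := by
  unfold pvW
  rw [List.reverse_cons, List.find?_append]
  cases h : L.reverse.find? (fun c' => c'.1 == t) with
  | some c' => simp
  | none =>
    by_cases hc : c.1 = t
    · simp [List.find?, hc]
    · have hb : (c.1 == t) = false := by simp [hc]
      simp [List.find?, hb, hc]

theorem foldl_pvStep (L : List (Int × Int)) :
    ∀ a b c d : String,
      L.foldl pvStep [a, b, c, d] = [pvW L 5 a, pvW L 9 b, pvW L 13 c, pvW L 0 d] := by
  induction L with
  | nil => intro a b c d; simp [pvW]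
  | cons e L ih =>
    intro a b c d
    rw [List.foldl_cons, pvW_cons, pvW_cons, pvW_cons, pvW_cons]
    by_cases h5 : e.1 = 5
    · simp [pvStep, h5, PySem.List.pySetD_of_nonneg, ih]
    · by_cases h9 : e.1 = 9
      · simp [pvStep, h9, PySem.List.pySetD_of_nonneg, ih]
      · by_cases h13 : e.1 = 13
        · simp [pvStep, h13, PySem.List.pySetD_of_nonneg, ih]
        · by_cases h0 : e.1 = 0
          · simp [pvStep, h0, PySem.List.pySetD_of_nonneg, ih]
          · simp [pvStep, h5, h9, h13, h0, ih]

theorem encode_A_flat (board : List (List Int)) :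
    encode5913_board board =
      PySem.Str.join "" ((pvCells board).foldl pvStep ["x", "x", "x", "x"]) := by
  simp only [encode5913_board, pvCells]
  rw [foldl_flatMap', PySem.List.enumerate_eq_map_pyRange board [], List.foldl_map]
  congr 1
  refine List.foldl_ext _ _ _ (fun el i _ => ?_)
  rw [PySem.List.enumerate_eq_map_pyRange (PySem.List.pyGetD board i []) 0,
      List.foldl_map, List.foldl_map]
  rfl

theorem pvFindBack_eq_pvW (L : List (Int × Int)) (t : Int) :
    pvFindBack L t = pvW L t "x" := rfl

-- ===== VERDICT (by name: the statement is the Claim_ definition above) =====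
theorem encode5913_board_spec : Claim_equal_encode5913_board := by
  intro board _ _
  unfold Spec_encode5913_board
  rw [encode_A_flat, foldl_pvStep]
  unfold encode5913_board_alt
  simp [List.map, pvFindBack_eq_pvW]
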